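-- pv_equiv track=rewrite | github.com/leonel-fonseca/python-basics | code/example_16.py | count_and_sum_only_odd_numbers_until_sum_limit
-- ===== SOURCE A (Python) =====
-- def count_and_sum_only_odd_numbers_until_sum_limit(lst, limit):
--     """
--     Simple Case: Return the count and the sum of numbers in a list
--     only when they are odd.
--     If your list is [1,2,3,4], then the result should be (2, 4),
--     as only 1 and 3 are odd numbers.
--     Stop when the sum is greater than or equal to the limit.
--     """
--     count = 0
--     sum = 0
--     for num in lst:
--         if num % 2 == 1:
--             count += 1
--             sum += num
--             if sum >= limit:
--                 break # This is how you exit a loop.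
--     return count, sum
-- ===== SOURCE B (Python) =====
-- def count_and_sum_only_odd_numbers_until_sum_limit(lst, limit):
--     # Materialise the odd numbers, build the prefix-sum table, then search it.
--     odds = [n for n in lst if n % 2 == 1]
--     prefix = []
--     s = 0
--     for n in odds:
--         s += n
--         prefix.append(s)
--     for i, p in enumerate(prefix):
--         if p >= limit:
--             return (i + 1, p)
--     return (len(odds), sum(odds))
-- ===== Notes on version B (the rewrite author's own statement) =====
-- stated objective: alternative
-- what changed: A's single interleaved accumulate-and-break loop is replaced by a pipeline: filter the odd numbers, materialise their prefix-sum table, then linearly search that table for the first prefix >= limit (falling back to full count/sum).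
import Mathlib
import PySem

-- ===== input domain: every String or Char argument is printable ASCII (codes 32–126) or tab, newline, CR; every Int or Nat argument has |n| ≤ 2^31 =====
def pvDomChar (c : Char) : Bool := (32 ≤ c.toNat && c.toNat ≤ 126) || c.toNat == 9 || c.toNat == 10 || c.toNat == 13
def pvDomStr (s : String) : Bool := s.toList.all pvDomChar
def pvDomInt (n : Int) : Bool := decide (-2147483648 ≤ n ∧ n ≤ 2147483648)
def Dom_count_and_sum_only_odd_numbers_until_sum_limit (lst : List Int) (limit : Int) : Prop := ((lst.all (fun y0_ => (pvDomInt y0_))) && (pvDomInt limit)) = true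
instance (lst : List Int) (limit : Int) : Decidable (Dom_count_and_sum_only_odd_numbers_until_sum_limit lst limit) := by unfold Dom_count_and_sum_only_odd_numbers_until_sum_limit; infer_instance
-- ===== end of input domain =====

-- B replaces A's interleaved accumulate-and-break loop by a filter / prefix-sum-table / linear-search pipeline (alternative decomposition, same cost).
-- ===== PORT A =====
-- A's loop with its break, as structural recursion over (count, sum)
def pvLoopA (limit : Int) : List Int → Int → Int → Int × Int
  | [], count, sum => (count, sum)
  | num :: rest, count, sum =>
    if PySem.Int.mod num 2 == 1 then
      let count' := count + 1
      let sum' := sum + num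
      if sum' ≥ limit then (count', sum') else pvLoopA limit rest count' sum'
    else pvLoopA limit rest count sum

def count_and_sum_only_odd_numbers_until_sum_limit (lst : List Int) (limit : Int) : Int × Int :=
  pvLoopA limit lst 0 0

-- ===== PORT B =====
-- B: prefix-sum table of the odds
def pvScan : List Int → Int → List Int
  | [], _ => []
  | n :: rest, s => (s + n) :: pvScan rest (s + n)

-- B: linear search of the table for the first prefix ≥ limit, carrying the index
def pvSearch (limit : Int) : List Int → Int → Option (Int × Int)
  | [], _ => none
  | p :: rest, i => if p ≥ limit then some (i + 1, p) else pvSearch limit rest (i + 1)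

def count_and_sum_only_odd_numbers_until_sum_limit_alt (lst : List Int) (limit : Int) : Int × Int :=
  let odds := lst.filter (fun n => PySem.Int.mod n 2 == 1)
  let pref := pvScan odds 0
  match pvSearch limit pref 0 with
  | some r => r
  | none => ((odds.length : Int), odds.foldl (· + ·) 0)

-- ===== PRECONDITION & SPEC =====
def Spec_count_and_sum_only_odd_numbers_until_sum_limit (lst : List Int) (limit : Int) (out : Int × Int) : Prop := out = count_and_sum_only_odd_numbers_until_sum_limit_alt lst limit
instance (lst : List Int) (limit : Int) (out : Int × Int) : Decidable (Spec_count_and_sum_only_odd_numbers_until_sum_limit lst limit out) := by unfold Spec_count_and_sum_only_odd_numbers_until_sum_limit; infer_instance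

-- ===== CLAIM (what is proved, stated in full; the proofs are below) =====
def Claim_equal_count_and_sum_only_odd_numbers_until_sum_limit : Prop := ∀ (lst : List Int) (limit : Int), Dom_count_and_sum_only_odd_numbers_until_sum_limit lst limit → Spec_count_and_sum_only_odd_numbers_until_sum_limit lst limit (count_and_sum_only_odd_numbers_until_sum_limit lst limit)

-- ===== LEMMAS AND PROOFS =====

-- A's loop ignores non-odd elements, so it equals the same loop over the filtered list
theorem pvLoopA_filter (limit : Int) (lst : List Int) : ∀ (c s : Int),
    pvLoopA limit lst c s = pvLoopA limit (lst.filter (fun n => PySem.Int.mod n 2 == 1)) c s := by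
  induction lst with
  | nil => intro c s; rfl
  | cons n rest ih =>
    intro c s
    by_cases h : (PySem.Int.mod n 2 == 1) = true
    · rw [List.filter_cons, if_pos h]
      simp only [pvLoopA]
      rw [if_pos h, if_pos h]
      by_cases hl : s + n ≥ limit
      · rw [if_pos hl, if_pos hl]
      · rw [if_neg hl, if_neg hl]; exact ih _ _
    · rw [List.filter_cons, if_neg h]
      simp only [pvLoopA]
      rw [if_neg h]
      exact ih c s

-- Over a list of odd numbers, A's loop equals B's prefix-table search (generalised over count/sum)
theorem pvLoopA_eq_search (limit : Int) (odds : List Int)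
    (hodd : ∀ n ∈ odds, (PySem.Int.mod n 2 == 1) = true) : ∀ (c s : Int),
    pvLoopA limit odds c s =
      (match pvSearch limit (pvScan odds s) c with
       | some r => r
       | none => (c + (odds.length : Int), odds.foldl (· + ·) s)) := by
  induction odds with
  | nil => intro c s; simp [pvLoopA, pvScan, pvSearch]
  | cons n rest ih =>
    intro c s
    have hn : (PySem.Int.mod n 2 == 1) = true := hodd n (by simp)
    have hrest : ∀ m ∈ rest, (PySem.Int.mod m 2 == 1) = true :=
      fun m hm => hodd m (by simp [hm])
    simp only [pvLoopA, pvScan, pvSearch]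
    rw [if_pos hn]
    by_cases hl : s + n ≥ limit
    · rw [if_pos hl, if_pos hl]
    · rw [if_neg hl, if_neg hl]
      rw [ih hrest (c + 1) (s + n)]
      cases hres : pvSearch limit (pvScan rest (s + n)) (c + 1) with
      | some r => simp
      | none =>
        simp only [List.length_cons, List.foldl, Prod.mk.injEq]
        refine ⟨by push_cast; ring, trivial⟩

-- ===== VERDICT (by name: the statement is the Claim_ definition above) =====
theorem count_and_sum_only_odd_numbers_until_sum_limit_spec : Claim_equal_count_and_sum_only_odd_numbers_until_sum_limit := by
  intro lst limit _
  unfold Spec_count_and_sum_only_odd_numbers_until_sum_limit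
  unfold count_and_sum_only_odd_numbers_until_sum_limit count_and_sum_only_odd_numbers_until_sum_limit_alt
  rw [pvLoopA_filter, pvLoopA_eq_search limit _
    (fun n hn => (List.mem_filter.mp hn).2)]
  simp
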